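-- pv_equiv track=rewrite | github.com/Shuesh/Public_Scripts | AOC_2021/Day_17/Solution_17_p1.py | X_Velocities
-- ===== SOURCE A (Python) =====
-- def X_Velocities(x_range):
--     x_coord = 0
--     x_velocity = 0
--     x_velocities = []
--
--     while x_coord < x_range[-1]:
--         x_coord += x_velocity
--         x_velocity += 1
--         if x_coord >= x_range[0] and x_coord <= x_range[-1]:
--             x_velocities.append(x_velocity)
--
--     return x_velocities
-- ===== SOURCE B (Python) =====
-- from math import isqrt
--
-- def X_Velocities(x_range):
--     lo, hi = x_range[0], x_range[-1]
--     if hi <= 0: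
--         return []
--     # largest v with v*(v-1)//2 <= hi:  (2v-1)^2 <= 8*hi+1
--     vmax = (1 + isqrt(8 * hi + 1)) // 2
--     if lo <= 0:
--         vmin = 1
--     else:
--         # smallest v with v*(v-1)//2 >= lo:  (2v-1)^2 >= 8*lo+1
--         vmin = (1 + isqrt(8 * lo + 1)) // 2
--         if vmin * (vmin - 1) // 2 < lo:
--             vmin += 1
--     return list(range(vmin, vmax + 1))
-- ===== Notes on version B (the rewrite author's own statement) =====
-- stated objective: alternative
-- what changed: Replaced the step-by-step cumulative position simulation with a closed form: the position for velocity v is the triangular number v*(v-1)//2, so the answer is the contiguous range [vmin, vmax] computed directly with integer square roots.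
import Mathlib
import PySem

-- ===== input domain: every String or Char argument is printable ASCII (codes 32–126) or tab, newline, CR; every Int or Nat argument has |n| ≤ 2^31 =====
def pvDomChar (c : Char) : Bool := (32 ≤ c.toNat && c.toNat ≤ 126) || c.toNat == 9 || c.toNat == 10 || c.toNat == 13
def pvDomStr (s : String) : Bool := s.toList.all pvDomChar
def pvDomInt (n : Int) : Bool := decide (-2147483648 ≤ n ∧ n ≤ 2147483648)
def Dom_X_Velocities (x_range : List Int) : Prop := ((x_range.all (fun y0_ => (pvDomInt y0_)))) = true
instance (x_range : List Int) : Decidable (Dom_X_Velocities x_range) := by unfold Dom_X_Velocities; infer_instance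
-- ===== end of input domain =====

-- B replaces A's cumulative position simulation by a closed-form bound computation with
-- integer square roots (triangular numbers), returning the same contiguous range of velocities.

-- ===== PORT A =====
-- the while loop of A: state (x_coord, x_velocity, x_velocities); x_range[0]/x_range[-1]
-- are constant during the loop, passed here as lo/hi
def XVelLoop (lo hi coord vel : Int) (acc : List Int) : List Int :=
  if coord < hi then
    XVelLoop lo hi (coord + vel) (vel + 1)
      (if lo ≤ coord + vel ∧ coord + vel ≤ hi then acc ++ [vel + 1] else acc)
  else acc
termination_by ((1 - vel).toNat, (hi - coord).toNat)
decreasing_by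
  by_cases h : vel ≤ 0
  · exact Prod.Lex.left _ _ (by omega)
  · have e : (1 - (vel + 1)).toNat = (1 - vel).toNat := by omega
    rw [e]
    exact Prod.Lex.right _ (by omega)

def X_Velocities (x_range : List Int) : List Int :=
  match PySem.List.pyGet? x_range (-1) with         -- x_range[-1] (IndexError on [])
  | some hi =>
    match PySem.List.pyGet? x_range 0 with          -- x_range[0]
    | some lo => XVelLoop lo hi 0 0 []
    | none => []                                    -- unreachable: excluded by Pre_
  | none => []                                      -- IndexError: excluded by Pre_

-- ===== PORT B =====
-- math.isqrt(n) for n ≥ 0 is exactly Nat.sqrt on the corresponding Nat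
def X_Velocities_alt (x_range : List Int) : List Int :=
  match PySem.List.pyGet? x_range 0, PySem.List.pyGet? x_range (-1) with
  | some lo, some hi =>
    if hi ≤ 0 then []
    else
      -- largest v with v*(v-1)//2 <= hi: (2v-1)^2 <= 8*hi+1
      let vmax := PySem.Int.floordiv (1 + (Nat.sqrt (8 * hi + 1).toNat : Int)) 2
      let vmin :=
        if lo ≤ 0 then 1
        else
          -- smallest v with v*(v-1)//2 >= lo: (2v-1)^2 >= 8*lo+1
          let c := PySem.Int.floordiv (1 + (Nat.sqrt (8 * lo + 1).toNat : Int)) 2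
          if PySem.Int.floordiv (c * (c - 1)) 2 < lo then c + 1 else c
      PySem.List.pyRange vmin (vmax + 1) 1
  | _, _ => []                                      -- IndexError: excluded by Pre_

-- ===== PRECONDITION & SPEC =====
-- Pre_ excludes only the empty list, on which Python A raises IndexError (x_range[-1])
def Pre_X_Velocities (x_range : List Int) : Prop := x_range ≠ []
instance (x_range : List Int) : Decidable (Pre_X_Velocities x_range) := by unfold Pre_X_Velocities; infer_instance

def pvWitness_X_Velocities : List Int := [7, 2, 20]

def Spec_X_Velocities (x_range : List Int) (out : List Int) : Prop := out = X_Velocities_alt x_range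
instance (x_range : List Int) (out : List Int) : Decidable (Spec_X_Velocities x_range out) := by unfold Spec_X_Velocities; infer_instance

-- ===== CLAIM (what is proved, stated in full; the proofs are below) =====
def Claim_equal_X_Velocities : Prop := ∀ (x_range : List Int), Dom_X_Velocities x_range → Pre_X_Velocities x_range → Spec_X_Velocities x_range (X_Velocities x_range)

-- ===== LEMMAS AND PROOFS =====

-- triangular number: position reached with initial x-velocity k is k*(k-1)//2
def tri (k : Int) : Int := k * (k - 1) / 2

theorem two_mul_tri (k : Int) : 2 * tri k = k * (k - 1) := by
  have h : (2 : Int) ∣ k * (k - 1) := by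
    rcases Int.even_mul_succ_self (k - 1) with ⟨m, hm⟩
    exact ⟨m, by linarith [hm]⟩
  exact Int.mul_ediv_cancel' h

theorem tri_succ (k : Int) : tri (k + 1) = tri k + k := by
  have h : 2 * tri (k + 1) = 2 * (tri k + k) := by
    rw [two_mul_tri, mul_add, two_mul_tri]; ring
  omega

theorem tri_mono {a b : Int} (ha : 0 ≤ a) (hab : a ≤ b) : tri a ≤ tri b := by
  have h1 := two_mul_tri a
  have h2 := two_mul_tri b
  have h3 : 0 ≤ (b - a) * (a + b - 1) := by
    rcases eq_or_lt_of_le hab with rfl | h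
    · simp
    · apply mul_nonneg <;> omega
  nlinarith

theorem tri_strict {a b : Int} (ha : 1 ≤ a) (hab : a < b) : tri a < tri b := by
  have h1 := two_mul_tri a
  have h2 := two_mul_tri b
  have h3 : 0 < (b - a) * (a + b - 1) := mul_pos (by omega) (by omega)
  nlinarith

theorem tri_zero : tri 0 = 0 := by decide
theorem tri_one : tri 1 = 0 := by decide

-- characterization glue: from local facts at the boundary to a global ↔
theorem vmin_char {lo m : Int} (hm : 1 ≤ m) (h1 : lo ≤ tri m) (h2 : tri (m - 1) < lo) :
    ∀ k : Int, 1 ≤ k → (m ≤ k ↔ lo ≤ tri k) := by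
  intro k hk
  constructor
  · intro h
    exact le_trans h1 (tri_mono (by omega) h)
  · intro h
    by_contra hc
    have hkm : k ≤ m - 1 := by omega
    have := tri_mono (by omega : (0:Int) ≤ k) hkm
    omega

theorem vmax_char {hi V : Int} (hV : 1 ≤ V) (h1 : tri V ≤ hi) (h2 : hi < tri (V + 1)) :
    ∀ k : Int, 1 ≤ k → (k ≤ V ↔ tri k ≤ hi) := by
  intro k hk
  constructor
  · intro h
    exact le_trans (tri_mono (by omega) h) h1
  · intro h
    by_contra hc
    have : tri (V + 1) ≤ tri k := tri_mono (by omega) (by omega)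
    omega

-- floordiv by the positive literal 2 is Int ediv
theorem fd2 (a : Int) : PySem.Int.floordiv a 2 = a / 2 :=
  PySem.Int.floordiv_eq_ediv_of_pos (by omega)

-- math.isqrt: the floor square root's defining bounds, cast to Int
theorem sqrt_bounds {n : Int} (hn : 0 ≤ n) :
    ((Nat.sqrt n.toNat : Int)) * (Nat.sqrt n.toNat : Int) ≤ n ∧
    n < ((Nat.sqrt n.toNat : Int) + 1) * ((Nat.sqrt n.toNat : Int) + 1) := by
  have h1 := Nat.sqrt_le' n.toNat
  have h2 := Nat.lt_succ_sqrt' n.toNat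
  rw [pow_two] at h1 h2
  have h1' : ((Nat.sqrt n.toNat * Nat.sqrt n.toNat : Nat) : Int) ≤ (n.toNat : Int) := by exact_mod_cast h1
  have h2' : ((n.toNat : Int)) < ((Nat.sqrt n.toNat + 1) * (Nat.sqrt n.toNat + 1) : Nat) := by exact_mod_cast h2
  push_cast at h1' h2'
  constructor <;> linarith [Int.toNat_of_nonneg hn]

-- the vmax B computes is the largest v with tri v ≤ hi
theorem vmax_spec {hi : Int} (hhi : 0 < hi) :
    1 ≤ PySem.Int.floordiv (1 + (Nat.sqrt (8 * hi + 1).toNat : Int)) 2 ∧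
    tri (PySem.Int.floordiv (1 + (Nat.sqrt (8 * hi + 1).toNat : Int)) 2) ≤ hi ∧
    hi < tri (PySem.Int.floordiv (1 + (Nat.sqrt (8 * hi + 1).toNat : Int)) 2 + 1) := by
  rw [fd2]
  obtain ⟨hl, hu⟩ := sqrt_bounds (show (0:Int) ≤ 8 * hi + 1 by omega)
  set s : Int := (Nat.sqrt (8 * hi + 1).toNat : Int) with hs
  have hs0 : 0 ≤ s := by positivity
  have hs3 : (3 : Int) ≤ s := by nlinarith
  set V : Int := (1 + s) / 2 with hV
  have hVb : 2 * V ≤ 1 + s ∧ 1 + s < 2 * V + 2 := by constructor <;> omega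
  have hV1 : 1 ≤ V := by omega
  have htV := two_mul_tri V
  have htV1 := two_mul_tri (V + 1)
  refine ⟨hV1, ?_, ?_⟩
  · nlinarith
  · nlinarith

-- the vmin B computes is the smallest v with lo ≤ tri v  (case 0 < lo)
theorem vmin_spec {lo : Int} (hlo : 0 < lo) :
    1 ≤ (if PySem.Int.floordiv
            (PySem.Int.floordiv (1 + (Nat.sqrt (8 * lo + 1).toNat : Int)) 2 *
              (PySem.Int.floordiv (1 + (Nat.sqrt (8 * lo + 1).toNat : Int)) 2 - 1)) 2 < lo
         then PySem.Int.floordiv (1 + (Nat.sqrt (8 * lo + 1).toNat : Int)) 2 + 1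
         else PySem.Int.floordiv (1 + (Nat.sqrt (8 * lo + 1).toNat : Int)) 2) ∧
    ∀ k : Int, 1 ≤ k →
      ((if PySem.Int.floordiv
            (PySem.Int.floordiv (1 + (Nat.sqrt (8 * lo + 1).toNat : Int)) 2 *
              (PySem.Int.floordiv (1 + (Nat.sqrt (8 * lo + 1).toNat : Int)) 2 - 1)) 2 < lo
         then PySem.Int.floordiv (1 + (Nat.sqrt (8 * lo + 1).toNat : Int)) 2 + 1
         else PySem.Int.floordiv (1 + (Nat.sqrt (8 * lo + 1).toNat : Int)) 2) ≤ k ↔ lo ≤ tri k) := by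
  simp only [fd2]
  obtain ⟨hl, hu⟩ := sqrt_bounds (show (0:Int) ≤ 8 * lo + 1 by omega)
  set s : Int := (Nat.sqrt (8 * lo + 1).toNat : Int) with hs
  have hs0 : 0 ≤ s := by positivity
  have hs3 : (3 : Int) ≤ s := by nlinarith
  set c : Int := (1 + s) / 2 with hc
  have hcb : 2 * c ≤ 1 + s ∧ 1 + s < 2 * c + 2 := by constructor <;> omega
  have hc2 : 2 ≤ c := by omega
  have htc := two_mul_tri c
  have htc1 := two_mul_tri (c + 1)
  have htcm := two_mul_tri (c - 1)
  have hup : lo ≤ tri (c + 1) := by nlinarith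
  have hdn : tri (c - 1) < lo := by nlinarith
  rw [show c * (c - 1) / 2 = tri c from rfl]
  by_cases hsplit : tri c < lo
  · simp only [if_pos hsplit]
    exact ⟨by omega, vmin_char (by omega) hup (by simpa using hsplit)⟩
  · simp only [if_neg hsplit]
    exact ⟨by omega, vmin_char (by omega) (by omega) hdn⟩

-- the main loop invariant: from state (tri vel, vel) the loop appends exactly
-- the contiguous range of velocities (max (vel+1) vmin) .. V
theorem loop_main {lo hi vmin V : Int} (hhi : 0 < hi) (hV1 : 1 ≤ V)
    (hVc : ∀ k : Int, 1 ≤ k → (k ≤ V ↔ tri k ≤ hi))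
    (hmc : ∀ k : Int, 1 ≤ k → (vmin ≤ k ↔ lo ≤ tri k)) :
    ∀ (n : Nat) (vel : Int) (acc : List Int), 0 ≤ vel → (V + 1 - vel).toNat ≤ n →
      XVelLoop lo hi (tri vel) vel acc =
        acc ++ PySem.List.pyRange (max (vel + 1) vmin) (V + 1) 1 := by
  intro n
  induction n with
  | zero =>
    intro vel acc hvel hn
    have hvV : V + 1 ≤ vel := by omega
    have hstop : ¬ tri vel < hi := by
      have h1 : tri (V + 1) ≤ tri vel := tri_mono (by omega) hvV
      have h2 : ¬ (V + 1 ≤ V) := by omega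
      have := (hVc (V + 1) (by omega))
      omega
    rw [XVelLoop, if_neg hstop, PySem.List.pyRange_one_eq_nil (by omega), List.append_nil]
  | succ n ih =>
    intro vel acc hvel hn
    by_cases hstop : tri vel < hi
    · have hvleV : vel ≤ V := by
        by_contra hc
        have h1 : tri (V + 1) ≤ tri vel := tri_mono (by omega) (by omega)
        have := (hVc (V + 1) (by omega))
        omega
      rw [XVelLoop, if_pos hstop]
      have harg : tri vel + vel = tri (vel + 1) := by rw [tri_succ]
      rw [harg]
      rw [ih (vel + 1) _ (by omega) (by omega)]
      by_cases hvV : vel + 1 ≤ V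
      · have hth : tri (vel + 1) ≤ hi := (hVc (vel + 1) (by omega)).1 hvV
        by_cases hlo2 : vmin ≤ vel + 1
        · have : lo ≤ tri (vel + 1) := (hmc (vel + 1) (by omega)).1 hlo2
          rw [if_pos ⟨this, hth⟩]
          have hm1 : max (vel + 1) vmin = vel + 1 := by omega
          have hm2 : max (vel + 1 + 1) vmin = vel + 1 + 1 := by omega
          rw [hm1, hm2, PySem.List.pyRange_one_cons (by omega : vel + 1 < V + 1)]
          simp
        · have hnlo : ¬ lo ≤ tri (vel + 1) := fun h => hlo2 ((hmc (vel + 1) (by omega)).2 h)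
          rw [if_neg (by tauto)]
          have hm1 : max (vel + 1) vmin = vmin := by omega
          have hm2 : max (vel + 1 + 1) vmin = vmin := by omega
          rw [hm1, hm2]
      · have hth : ¬ tri (vel + 1) ≤ hi := fun h => hvV ((hVc (vel + 1) (by omega)).2 h)
        rw [if_neg (by tauto)]
        rw [PySem.List.pyRange_one_eq_nil (by omega),
            PySem.List.pyRange_one_eq_nil (by omega)]
    · have hVle : V ≤ vel := by
        by_contra hc
        rcases eq_or_lt_of_le hvel with h0 | h1
        · have h2 : tri vel = 0 := by rw [← h0]; exact tri_zero
          omega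
        · have h2 : tri vel < tri V := tri_strict (by omega) (by omega)
          have h3 := (hVc V (by omega)).1 (le_refl V)
          omega
      rw [XVelLoop, if_neg hstop, PySem.List.pyRange_one_eq_nil (by omega), List.append_nil]

-- pyGet? is some on a nonempty list at indices 0 and -1
theorem pyGet?_isSome_zero {xs : List Int} (h : xs ≠ []) :
    ∃ v, PySem.List.pyGet? xs 0 = some v := by
  rcases xs with _ | ⟨a, t⟩
  · exact absurd rfl h
  · exact ⟨a, by simp [PySem.List.pyGet?, PySem.List.pyIdx?]⟩

theorem pyGet?_isSome_neg_one {xs : List Int} (h : xs ≠ []) :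
    ∃ v, PySem.List.pyGet? xs (-1) = some v := by
  rcases xs with _ | ⟨a, t⟩
  · exact absurd rfl h
  · simp [PySem.List.pyGet?, PySem.List.pyIdx?]

-- ===== VERDICT (by name: the statement is the Claim_ definition above) =====
theorem X_Velocities_spec : Claim_equal_X_Velocities := by
  intro x_range _ hpre
  unfold Spec_X_Velocities
  obtain ⟨lo, hlo⟩ := pyGet?_isSome_zero hpre
  obtain ⟨hi, hhi⟩ := pyGet?_isSome_neg_one hpre
  unfold X_Velocities X_Velocities_alt
  rw [hlo, hhi]
  dsimp only
  by_cases hpos : hi ≤ 0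
  · rw [if_pos hpos, XVelLoop, if_neg (by omega)]
  · rw [if_neg hpos]
    push_neg at hpos
    obtain ⟨hV1, hVle, hVgt⟩ := vmax_spec hpos
    set V : Int := PySem.Int.floordiv (1 + (Nat.sqrt (8 * hi + 1).toNat : Int)) 2 with hVdef
    have hVc := vmax_char hV1 hVle hVgt
    by_cases hlo0 : lo ≤ 0
    · rw [if_pos hlo0]
      have hmc : ∀ k : Int, 1 ≤ k → ((1:Int) ≤ k ↔ lo ≤ tri k) := by
        intro k hk
        have h1 : tri 1 ≤ tri k := tri_mono (by omega) hk
        have h2 : tri 1 = 0 := tri_one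
        constructor <;> intro <;> omega
      have hmain := loop_main hpos hV1 hVc hmc ((V + 1).toNat) 0 [] (by omega) (by omega)
      rw [tri_zero] at hmain
      rw [hmain]
      simp
    · rw [if_neg hlo0]
      push_neg at hlo0
      obtain ⟨hm1, hmc⟩ := vmin_spec hlo0
      set m : Int := (if PySem.Int.floordiv
            (PySem.Int.floordiv (1 + (Nat.sqrt (8 * lo + 1).toNat : Int)) 2 *
              (PySem.Int.floordiv (1 + (Nat.sqrt (8 * lo + 1).toNat : Int)) 2 - 1)) 2 < lo
         then PySem.Int.floordiv (1 + (Nat.sqrt (8 * lo + 1).toNat : Int)) 2 + 1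
         else PySem.Int.floordiv (1 + (Nat.sqrt (8 * lo + 1).toNat : Int)) 2) with hmdef
      have hmain := loop_main hpos hV1 hVc hmc ((V + 1).toNat) 0 [] (by omega) (by omega)
      rw [tri_zero] at hmain
      rw [hmain]
      simp [show max (1:Int) m = m by omega]
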